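-- pv_equiv track=rewrite | github.com/SnaetWarre/Echocardiogram-OCR-analysis | app/pipeline/echo_ocr_pipeline.py | _extract_matching_ocr_line
-- ===== SOURCE A (Python) =====
-- def _extract_matching_ocr_line(raw_text: str, name: str, value: str) -> str:
--     lines = [line.strip() for line in raw_text.splitlines() if line.strip()]
--     lowered_name = name.lower().strip()
--     lowered_value = value.lower().strip()
--     for line in lines:
--         lowered = line.lower()
--         if lowered_name in lowered and lowered_value in lowered:
--             return line
--     for line in lines:
--         if lowered_value in line.lower():
--             return line
--     return lines[0] if lines else raw_text.strip()
-- ===== SOURCE B (Python) =====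
-- def _extract_matching_ocr_line(raw_text: str, name: str, value: str) -> str:
--     lines = [line.strip() for line in raw_text.splitlines() if line.strip()]
--     lowered_name = name.lower().strip()
--     lowered_value = value.lower().strip()
--     value_match = None
--     for line in lines:
--         lowered = line.lower()
--         if lowered_value in lowered:
--             if lowered_name in lowered:
--                 return line
--             if value_match is None:
--                 value_match = line
--     if value_match is not None:
--         return value_match
--     return lines[0] if lines else raw_text.strip()
-- ===== Notes on version B (the rewrite author's own statement) =====
-- stated objective: alternative
-- what changed: Replaces A's two sequential scans over the lines (first for name+value, then for value-only) with a single pass that returns immediately on a name+value match while remembering the first value-only match in an accumulator.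
import Mathlib
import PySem

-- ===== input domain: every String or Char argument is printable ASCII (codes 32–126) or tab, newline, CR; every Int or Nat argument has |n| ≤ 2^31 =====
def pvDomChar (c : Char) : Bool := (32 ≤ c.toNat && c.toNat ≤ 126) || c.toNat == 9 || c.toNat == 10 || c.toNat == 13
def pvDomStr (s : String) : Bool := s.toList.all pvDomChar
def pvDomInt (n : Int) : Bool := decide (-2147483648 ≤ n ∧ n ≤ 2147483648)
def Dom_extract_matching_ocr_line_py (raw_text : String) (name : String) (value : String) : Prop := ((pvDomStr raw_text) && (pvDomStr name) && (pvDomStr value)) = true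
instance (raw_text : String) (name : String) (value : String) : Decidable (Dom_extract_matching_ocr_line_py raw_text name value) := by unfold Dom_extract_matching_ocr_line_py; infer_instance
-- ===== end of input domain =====

-- B collapses A's two sequential scans into one pass that remembers the first value-only match; same return value everywhere.

-- ===== PORT A =====
-- A: build stripped non-empty lines, scan for name+value, then scan for value, then fallback.
def extract_matching_ocr_line_py (raw_text : String) (name : String) (value : String) : String :=
  let lines := ((PySem.Chars.splitlines raw_text.toList).map PySem.Chars.strip).filter (fun l => !l.isEmpty)
  let lowered_name := PySem.Chars.strip (PySem.Chars.lower name.toList)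
  let lowered_value := PySem.Chars.strip (PySem.Chars.lower value.toList)
  match lines.find? (fun line =>
      PySem.Chars.isIn lowered_name (PySem.Chars.lower line)
        && PySem.Chars.isIn lowered_value (PySem.Chars.lower line)) with
  | some line => String.ofList line
  | none =>
    match lines.find? (fun line => PySem.Chars.isIn lowered_value (PySem.Chars.lower line)) with
    | some line => String.ofList line
    | none =>
      match lines with
      | line :: _ => String.ofList line
      | [] => String.ofList (PySem.Chars.strip raw_text.toList)

-- ===== PORT B =====
-- B's loop: early return on a name+value line (some), else remember the first value-only line in acc.
def pvAltGo (lowered_name lowered_value : List Char) :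
    List (List Char) → Option (List Char) → Option (List Char)
  | [], acc => acc
  | line :: rest, acc =>
    let lowered := PySem.Chars.lower line
    if PySem.Chars.isIn lowered_value lowered then
      if PySem.Chars.isIn lowered_name lowered then some line
      else pvAltGo lowered_name lowered_value rest (if acc.isNone then some line else acc)
    else pvAltGo lowered_name lowered_value rest acc

def extract_matching_ocr_line_py_alt (raw_text : String) (name : String) (value : String) : String :=
  let lines := ((PySem.Chars.splitlines raw_text.toList).map PySem.Chars.strip).filter (fun l => !l.isEmpty)
  let lowered_name := PySem.Chars.strip (PySem.Chars.lower name.toList)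
  let lowered_value := PySem.Chars.strip (PySem.Chars.lower value.toList)
  match pvAltGo lowered_name lowered_value lines none with
  | some line => String.ofList line
  | none =>
    match lines with
    | line :: _ => String.ofList line
    | [] => String.ofList (PySem.Chars.strip raw_text.toList)

-- ===== PRECONDITION & SPEC =====
def Spec_extract_matching_ocr_line_py (raw_text : String) (name : String) (value : String) (out : String) : Prop := out = extract_matching_ocr_line_py_alt raw_text name value
instance (raw_text : String) (name : String) (value : String) (out : String) : Decidable (Spec_extract_matching_ocr_line_py raw_text name value out) := by unfold Spec_extract_matching_ocr_line_py; infer_instance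

-- ===== CLAIM (what is proved, stated in full; the proofs are below) =====
def Claim_equal_extract_matching_ocr_line_py : Prop := ∀ (raw_text : String) (name : String) (value : String), Dom_extract_matching_ocr_line_py raw_text name value → Spec_extract_matching_ocr_line_py raw_text name value (extract_matching_ocr_line_py raw_text name value)

-- ===== LEMMAS AND PROOFS =====
-- B's single pass equals: first name+value match, else the remembered acc, else the first value-only match.
theorem pvAltGo_spec (ln lv : List Char) (ls : List (List Char)) (acc : Option (List Char)) :
    pvAltGo ln lv ls acc =
      match ls.find? (fun l => PySem.Chars.isIn ln (PySem.Chars.lower l)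
          && PySem.Chars.isIn lv (PySem.Chars.lower l)) with
      | some l => some l
      | none =>
        match acc with
        | some a => some a
        | none => ls.find? (fun l => PySem.Chars.isIn lv (PySem.Chars.lower l)) := by
  induction ls generalizing acc with
  | nil => cases acc <;> simp [pvAltGo]
  | cons l rest ih =>
    by_cases hv : PySem.Chars.isIn lv (PySem.Chars.lower l) = true
    · by_cases hn : PySem.Chars.isIn ln (PySem.Chars.lower l) = true
      · simp [pvAltGo, hv, hn, List.find?]
      · cases acc <;>
          simp [pvAltGo, hv, hn, List.find?, ih]
    · cases acc <;>
        simp [pvAltGo, hv, List.find?, ih]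

-- ===== VERDICT (by name: the statement is the Claim_ definition above) =====
theorem extract_matching_ocr_line_py_spec : Claim_equal_extract_matching_ocr_line_py := by
  intro raw_text name value _
  unfold Spec_extract_matching_ocr_line_py extract_matching_ocr_line_py extract_matching_ocr_line_py_alt
  simp only [pvAltGo_spec]
  cases h1 : (((PySem.Chars.splitlines raw_text.toList).map PySem.Chars.strip).filter
      (fun l => !l.isEmpty)).find? (fun line =>
        PySem.Chars.isIn (PySem.Chars.strip (PySem.Chars.lower name.toList)) (PySem.Chars.lower line)
          && PySem.Chars.isIn (PySem.Chars.strip (PySem.Chars.lower value.toList)) (PySem.Chars.lower line)) with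
  | some line => rfl
  | none =>
    cases h2 : (((PySem.Chars.splitlines raw_text.toList).map PySem.Chars.strip).filter
        (fun l => !l.isEmpty)).find? (fun line =>
          PySem.Chars.isIn (PySem.Chars.strip (PySem.Chars.lower value.toList)) (PySem.Chars.lower line)) <;> rfl
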